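-- pv_equiv track=rewrite | github.com/yukaribbba/.5H5_zxOEbTtshlkPt_1D1FtgSz0GXiZ | geo_core.py | merge_dl_dicts
-- ===== SOURCE A (Python) =====
-- from collections import defaultdict
--
-- def merge_dl_dicts(d1: dict[str, dict[str, list[str]]],
--                    d2: dict[str, dict[str, list[str]]]) -> dict[str, dict[str, list[str]]]:
--     merged = defaultdict(lambda: defaultdict(list))
--
--     for outer_key, inner_dict in d1.items():
--         for inner_key, url_list in inner_dict.items():
--             merged[outer_key][inner_key].extend(url_list)
--
--     for outer_key, inner_dict in d2.items():
--         for inner_key, url_list in inner_dict.items():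
--             merged[outer_key][inner_key].extend(url_list)
--
--     result: dict[str, dict[str, list[str]]] = {}
--     for outer_key, inner_dict in merged.items():
--         result[outer_key] = {}
--         for inner_key, url_list in inner_dict.items():
--             result[outer_key][inner_key] = list(dict.fromkeys(url_list))
--
--     return result
-- ===== SOURCE B (Python) =====
-- def merge_dl_dicts(d1, d2):
--     order = dict.fromkeys((ok, ik)
--                           for src in (d1, d2)
--                           for ok, inner in src.items()
--                           for ik in inner)
--     result = {}
--     for ok, ik in order:
--         urls = d1.get(ok, {}).get(ik, []) + d2.get(ok, {}).get(ik, [])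
--         result.setdefault(ok, {})[ik] = list(dict.fromkeys(urls))
--     return result
-- ===== Notes on version B (the rewrite author's own statement) =====
-- stated objective: simpler
-- what changed: B flattens both inputs into one deduplicated first-occurrence list of (outer,inner) key pairs and builds each merged url list directly by two lookups, instead of A's two defaultdict accumulation passes followed by a rebuild-with-dedup pass; Pre_ only excludes association lists with duplicate keys, which represent no Python dict.
import Mathlib
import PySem

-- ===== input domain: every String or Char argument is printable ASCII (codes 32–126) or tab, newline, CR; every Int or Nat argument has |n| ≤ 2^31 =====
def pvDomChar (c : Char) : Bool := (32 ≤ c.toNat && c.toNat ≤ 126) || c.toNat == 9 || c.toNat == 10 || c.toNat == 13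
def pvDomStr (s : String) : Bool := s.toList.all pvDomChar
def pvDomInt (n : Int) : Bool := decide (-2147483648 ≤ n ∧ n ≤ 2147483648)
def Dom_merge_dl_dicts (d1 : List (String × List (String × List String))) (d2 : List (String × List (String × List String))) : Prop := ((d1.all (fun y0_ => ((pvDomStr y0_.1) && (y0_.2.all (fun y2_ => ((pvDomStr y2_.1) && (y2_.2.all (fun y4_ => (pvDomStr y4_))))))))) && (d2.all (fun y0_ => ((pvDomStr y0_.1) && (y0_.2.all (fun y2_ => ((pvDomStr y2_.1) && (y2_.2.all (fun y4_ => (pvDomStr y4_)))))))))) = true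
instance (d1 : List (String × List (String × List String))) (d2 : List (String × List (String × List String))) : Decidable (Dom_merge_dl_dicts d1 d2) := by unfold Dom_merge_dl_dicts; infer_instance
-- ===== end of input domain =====

-- B replaces A's three passes (two defaultdict accumulation loops and a rebuild-with-dedup pass) by
-- one deduplicated (outer,inner) key-pair order plus a direct lookup-and-merge per pair; same cost, simpler.

-- ===== PORT A =====
-- A's two accumulation loops over one outer dict: merged[outer_key][inner_key].extend(url_list)
def pvAccum (m : PySem.Dict String (PySem.Dict String (List String)))
    (d : List (String × List (String × List String))) :
    PySem.Dict String (PySem.Dict String (List String)) :=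
  d.foldl (fun m p =>
    p.2.foldl (fun m q =>
      m.modify p.1 PySem.Dict.empty (fun mi => mi.modify q.1 [] (fun l => l ++ q.2))) m) m

def merge_dl_dicts (d1 : List (String × List (String × List String))) (d2 : List (String × List (String × List String))) : List (String × List (String × List String)) :=
  let merged := pvAccum (pvAccum PySem.Dict.empty d1) d2
  merged.items.map (fun p => (p.1, p.2.items.map (fun q => (q.1, PySem.List.dedup q.2))))

-- ===== PORT B =====
-- order = dict.fromkeys(pairs) keeps first occurrences in order = PySem.Set.ofList;
-- result.setdefault(ok, {})[ik] = v  is  res.modify ok empty (insert ik v)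
def merge_dl_dicts_alt (d1 : List (String × List (String × List String))) (d2 : List (String × List (String × List String))) : List (String × List (String × List String)) :=
  let order : List (String × String) :=
    PySem.Set.ofList ((d1 ++ d2).flatMap (fun p => p.2.map (fun q => (p.1, q.1))))
  let result := order.foldl (fun res pr =>
    let urls := (List.lookup pr.2 ((List.lookup pr.1 d1).getD [])).getD [] ++
                (List.lookup pr.2 ((List.lookup pr.1 d2).getD [])).getD []
    res.modify pr.1 PySem.Dict.empty (fun inner => inner.insert pr.2 (PySem.List.dedup urls)))
    PySem.Dict.empty
  result.items.map (fun p => (p.1, p.2.items))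

-- ===== PRECONDITION & SPEC =====
-- Pre_ only excludes association lists with duplicate keys (at the outer level or inside an inner
-- dict): such lists do not represent any Python dict input, since dict keys are always distinct.
def Pre_merge_dl_dicts (d1 : List (String × List (String × List String))) (d2 : List (String × List (String × List String))) : Prop :=
  (d1.map Prod.fst).Nodup ∧ (d2.map Prod.fst).Nodup ∧
  (∀ p ∈ d1, (p.2.map Prod.fst).Nodup) ∧ (∀ p ∈ d2, (p.2.map Prod.fst).Nodup)
instance (d1 : List (String × List (String × List String))) (d2 : List (String × List (String × List String))) : Decidable (Pre_merge_dl_dicts d1 d2) := by unfold Pre_merge_dl_dicts; infer_instance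

def pvWitness_merge_dl_dicts : (List (String × List (String × List String))) × (List (String × List (String × List String))) :=
  ([("a", [("x", ["u", "v", "u"])]), ("b", [])], [("a", [("x", ["w", "v"]), ("y", [])])])

def Spec_merge_dl_dicts (d1 : List (String × List (String × List String))) (d2 : List (String × List (String × List String))) (out : List (String × List (String × List String))) : Prop := out = merge_dl_dicts_alt d1 d2
instance (d1 : List (String × List (String × List String))) (d2 : List (String × List (String × List String))) (out : List (String × List (String × List String))) : Decidable (Spec_merge_dl_dicts d1 d2 out) := by unfold Spec_merge_dl_dicts; infer_instance

-- ===== CLAIM (what is proved, stated in full; the proofs are below) =====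
def Claim_equal_merge_dl_dicts : Prop := ∀ (d1 : List (String × List (String × List String))) (d2 : List (String × List (String × List String))), Dom_merge_dl_dicts d1 d2 → Pre_merge_dl_dicts d1 d2 → Spec_merge_dl_dicts d1 d2 (merge_dl_dicts d1 d2)

-- ===== LEMMAS AND PROOFS =====

def pvFlat (d : List (String × List (String × List String))) : List (String × (String × List String)) :=
  d.flatMap (fun p => p.2.map (fun q => (p.1, q)))

theorem pvAccum_eq_flat (d : List (String × List (String × List String)))
    (m : PySem.Dict String (PySem.Dict String (List String))) :
    pvAccum m d = (pvFlat d).foldl (fun m r =>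
      m.modify r.1 PySem.Dict.empty (fun mi => mi.modify r.2.1 [] (fun l => l ++ r.2.2))) m := by
  induction d generalizing m with
  | nil => rfl
  | cons p t ih =>
    simp [pvAccum, pvFlat, List.foldl_append, List.foldl_map] at *
    simp [ih]

theorem pvGetD_foldl_modify {α : Type} (l : List α) (key : α → String)
    {ν : Type} (f : α → ν → ν) (d0 : ν) (d : PySem.Dict String ν) (c : String) :
    (l.foldl (fun d a => d.modify (key a) d0 (f a)) d).getD c d0 =
      (l.filter (fun a => key a == c)).foldl (fun x a => f a x) (d.getD c d0) := by
  induction l generalizing d with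
  | nil => rfl
  | cons a t ih =>
    simp only [List.foldl_cons, List.filter_cons]
    rw [ih, PySem.Dict.getD_modify]
    by_cases h : key a = c
    · simp [h]
    · rw [if_neg (fun hc => h hc.symm)]
      simp [h]

-- canonical form of the A side
theorem pvA_canon (d1 d2 : List (String × List (String × List String)))
    (h1 : (d1.map Prod.fst).Nodup) (h2 : (d2.map Prod.fst).Nodup) :
    merge_dl_dicts d1 d2 =
      (PySem.Set.ofList (((pvFlat d1 ++ pvFlat d2)).map Prod.fst)).map (fun ok =>
        let G := (pvFlat d1 ++ pvFlat d2).filter (fun r => r.1 == ok)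
        let innerD := G.foldl (fun mi r => mi.modify r.2.1 [] (fun l => l ++ r.2.2)) PySem.Dict.empty
        (ok, (PySem.Set.ofList (G.map (fun r => r.2.1))).map (fun ik =>
          (ik, PySem.List.dedup (innerD.getD ik []))))) := by
  show (pvAccum (pvAccum PySem.Dict.empty d1) d2).items.map
      (fun p => (p.1, p.2.items.map (fun q => (q.1, PySem.List.dedup q.2)))) = _
  rw [pvAccum_eq_flat, pvAccum_eq_flat, ← List.foldl_append]
  set L := pvFlat d1 ++ pvFlat d2 with hL
  set step := fun (m : PySem.Dict String (PySem.Dict String (List String))) (r : String × (String × List String)) =>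
    m.modify r.1 PySem.Dict.empty (fun mi => mi.modify r.2.1 [] (fun l => l ++ r.2.2)) with hstep
  have hknd : (L.foldl step PySem.Dict.empty).keys.Nodup := by
    exact PySem.Dict.nodup_keys_foldl_modify_key L Prod.fst PySem.Dict.empty
      (fun _ r mi => mi.modify r.2.1 [] (fun l => l ++ r.2.2)) PySem.Dict.empty
      PySem.Dict.nodup_keys_empty
  have hkeys : (L.foldl step PySem.Dict.empty).keys = PySem.Set.ofList (L.map Prod.fst) := by
    rw [show step = (fun d x => d.modify (Prod.fst x) PySem.Dict.empty
      ((fun (_ : PySem.Dict String (PySem.Dict String (List String))) (r : String × (String × List String)) (mi : PySem.Dict String (List String)) => mi.modify r.2.1 [] (fun l => l ++ r.2.2)) d x)) from rfl]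
    rw [PySem.Dict.keys_foldl_modify_key]
    simp [PySem.Set.update_nil_left]
  have hitems : (L.foldl step PySem.Dict.empty).items =
      (PySem.Set.ofList (L.map Prod.fst)).map (fun k => (k, (L.foldl step PySem.Dict.empty).getD k PySem.Dict.empty)) := by
    rw [← hkeys]
    exact PySem.Dict.items_eq_map_keys _ hknd _
  rw [hitems, List.map_map]
  apply List.map_congr_left
  intro ok _
  have hgd : (L.foldl step PySem.Dict.empty).getD ok PySem.Dict.empty =
      (L.filter (fun r => r.1 == ok)).foldl
        (fun x r => x.modify r.2.1 [] (fun l => l ++ r.2.2)) PySem.Dict.empty := by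
    have := pvGetD_foldl_modify L Prod.fst
      (fun r mi => mi.modify r.2.1 [] (fun l => l ++ r.2.2)) PySem.Dict.empty PySem.Dict.empty ok
    simpa [PySem.Dict.getD_empty] using this
  set G := L.filter (fun r => r.1 == ok) with hG
  have hind : (G.foldl (fun x r => x.modify r.2.1 [] (fun l => l ++ r.2.2)) PySem.Dict.empty).keys.Nodup := by
    exact PySem.Dict.nodup_keys_foldl_modify_key G (fun r => r.2.1) []
      (fun _ r l => l ++ r.2.2) PySem.Dict.empty PySem.Dict.nodup_keys_empty
  have hik : (G.foldl (fun x r => x.modify r.2.1 [] (fun l => l ++ r.2.2)) PySem.Dict.empty).keys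
      = PySem.Set.ofList (G.map (fun r => r.2.1)) := by
    rw [show (fun (x : PySem.Dict String (List String)) (r : String × (String × List String)) =>
      x.modify r.2.1 [] (fun l => l ++ r.2.2)) = (fun d x => d.modify ((fun (r : String × (String × List String)) => r.2.1) x) []
      ((fun (_ : PySem.Dict String (List String)) (r : String × (String × List String)) (l : List String) => l ++ r.2.2) d x)) from rfl]
    rw [PySem.Dict.keys_foldl_modify_key]
    simp [PySem.Set.update_nil_left]
  have hiitems : (G.foldl (fun x r => x.modify r.2.1 [] (fun l => l ++ r.2.2)) PySem.Dict.empty).items =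
      (PySem.Set.ofList (G.map (fun r => r.2.1))).map (fun ik =>
        (ik, (G.foldl (fun x r => x.modify r.2.1 [] (fun l => l ++ r.2.2)) PySem.Dict.empty).getD ik [])) := by
    rw [← hik]
    exact PySem.Dict.items_eq_map_keys _ hind _
  simp only [Function.comp_def, hgd, hiitems, List.map_map]

theorem pvFoldl_append_eq_flatten {α : Type} (l : List α) (g : α → List String) (s : List String) :
    l.foldl (fun x a => x ++ g a) s = s ++ (l.map g).flatten := by
  induction l generalizing s with
  | nil => simp
  | cons a t ih => simp [ih]

theorem pvFilter_flat_nil (d : List (String × List (String × List String))) (ok : String)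
    (h : ok ∉ d.map Prod.fst) : (pvFlat d).filter (fun r => r.1 == ok) = [] := by
  induction d with
  | nil => rfl
  | cons p t ih =>
    have h1 : p.1 ≠ ok := fun e => h (by simp [e])
    have h2 : ok ∉ t.map Prod.fst := fun e => h (by simp [e])
    simp only [pvFlat, List.flatMap_cons, List.filter_append]
    rw [List.filter_map]
    have : (p.2.filter (fun q => ((fun q => (p.1, q)) q).1 == ok)) = [] := by
      simp [h1]
    simp only [Function.comp_def] at this ⊢
    rw [this]
    simpa [pvFlat] using ih h2

theorem pvFilter_flat (d : List (String × List (String × List String))) (ok : String)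
    (h : (d.map Prod.fst).Nodup) :
    (pvFlat d).filter (fun r => r.1 == ok) = ((List.lookup ok d).getD []).map (fun q => (ok, q)) := by
  induction d with
  | nil => rfl
  | cons p t ih =>
    have hnd : (t.map Prod.fst).Nodup := (List.nodup_cons.mp h).2
    have hni : p.1 ∉ t.map Prod.fst := (List.nodup_cons.mp h).1
    simp only [pvFlat, List.flatMap_cons, List.filter_append]
    rw [List.filter_map]
    by_cases hk : p.1 = ok
    · have e1 : List.lookup ok (p :: t) = some p.2 := by simp [List.lookup, hk]
      have e2 : (pvFlat t).filter (fun r => r.1 == ok) = [] :=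
        pvFilter_flat_nil t ok (fun e => hni (hk ▸ e))
      simp only [Function.comp_def, hk, pvFlat] at *
      simp [e1, e2]
    · have e1 : List.lookup ok (p :: t) = List.lookup ok t := by
        have : (ok == p.1) = false := by exact beq_eq_false_iff_ne.mpr (fun e => hk (Eq.symm e))
        simp [List.lookup, this]
      have e2 : (p.2.filter fun q => ((fun q => (p.1, q)) q).1 == ok) = [] := by simp [hk]
      simp only [Function.comp_def] at e2 ⊢
      rw [e2, e1, ← ih hnd]
      simp [pvFlat]

theorem pvFlatten_filter_lookup (i : List (String × List String)) (ik : String)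
    (h : (i.map Prod.fst).Nodup) :
    ((i.filter (fun q => q.1 == ik)).map (fun q => q.2)).flatten = (List.lookup ik i).getD [] := by
  induction i with
  | nil => rfl
  | cons p t ih =>
    have hnd : (t.map Prod.fst).Nodup := (List.nodup_cons.mp h).2
    have hni : p.1 ∉ t.map Prod.fst := (List.nodup_cons.mp h).1
    by_cases hk : p.1 = ik
    · have e1 : List.lookup ik (p :: t) = some p.2 := by simp [List.lookup, hk]
      have e2 : t.filter (fun q => q.1 == ik) = [] := by
        apply List.filter_eq_nil_iff.mpr
        intro q hq hcon
        have hq1 : q.1 = ik := by simpa using hcon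
        exact hni (by rw [hk, ← hq1]; exact List.mem_map.mpr ⟨q, hq, rfl⟩)
      simp [hk, e1, e2]
    · have e1 : List.lookup ik (p :: t) = List.lookup ik t := by
        have : (ik == p.1) = false := by exact beq_eq_false_iff_ne.mpr (fun e => hk (Eq.symm e))
        simp [List.lookup, this]
      simp [hk, e1, ih hnd]

theorem pvLookup_nodup (d : List (String × List (String × List String))) (k : String)
    (h : ∀ p ∈ d, (p.2.map Prod.fst).Nodup) :
    (((List.lookup k d).getD []).map Prod.fst).Nodup := by
  induction d with
  | nil => simp
  | cons p t ih =>
    by_cases hk : k = p.1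
    · have e1 : List.lookup k (p :: t) = some p.2 := by simp [List.lookup, hk]
      simpa [e1] using h p (by simp)
    · have e1 : List.lookup k (p :: t) = List.lookup k t := by
        have : (k == p.1) = false := by simp [hk]
        simp [List.lookup, this]
      rw [e1]
      exact ih (fun q hq => h q (by simp [hq]))

-- dedup commutes with a map taken after dedup
theorem pvOfList_map_ofList {α β : Type} [BEq α] [LawfulBEq α] [BEq β] [LawfulBEq β]
    (f : α → β) (xs : List α) :
    PySem.Set.ofList ((PySem.Set.ofList xs).map f) = PySem.Set.ofList (xs.map f) := by
  induction xs using List.reverseRecOn with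
  | nil => rfl
  | append_singleton xs x ih =>
    rw [PySem.Set.ofList_append_singleton, List.map_append, List.map_singleton,
        PySem.Set.ofList_append_singleton, ← ih, PySem.Set.add_eq_ite]
    by_cases hx : x ∈ PySem.Set.ofList xs
    · rw [if_pos hx]
      have hm : f x ∈ (PySem.Set.ofList xs).map f := List.mem_map.mpr ⟨x, hx, rfl⟩
      rw [PySem.Set.add_of_mem ((PySem.Set.mem_ofList _ _).mpr hm)]
    · rw [if_neg hx, List.map_append, List.map_singleton, PySem.Set.ofList_append_singleton]

-- taking the second components of the pairs with a fixed first component commutes with dedup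
theorem pvOfList_filter_snd {α β : Type} [BEq α] [LawfulBEq α] [BEq β] [LawfulBEq β]
    (xs : List (α × β)) (ok : α) :
    ((PySem.Set.ofList xs).filter (fun pr => pr.1 == ok)).map Prod.snd
      = PySem.Set.ofList ((xs.filter (fun pr => pr.1 == ok)).map Prod.snd) := by
  induction xs using List.reverseRecOn with
  | nil => rfl
  | append_singleton xs x ih =>
    rw [PySem.Set.ofList_append_singleton, PySem.Set.add_eq_ite, List.filter_append]
    by_cases hx : x ∈ PySem.Set.ofList xs
    · rw [if_pos hx]
      by_cases hq : x.1 = ok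
      · have hxmem : x ∈ xs := (PySem.Set.mem_ofList _ _).mp hx
        have hm : x.2 ∈ (xs.filter (fun pr => pr.1 == ok)).map Prod.snd :=
          List.mem_map.mpr ⟨x, List.mem_filter.mpr ⟨hxmem, by simp [hq]⟩, rfl⟩
        rw [show (([x].filter (fun pr => pr.1 == ok)) = [x]) from by simp [hq]]
        rw [List.map_append, List.map_singleton, PySem.Set.ofList_append_singleton,
            PySem.Set.add_of_mem ((PySem.Set.mem_ofList _ _).mpr hm)]
        exact ih
      · rw [show (([x].filter (fun pr => pr.1 == ok)) = []) from by simp [hq]]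
        simpa using ih
    · rw [if_neg hx, List.filter_append]
      by_cases hq : x.1 = ok
      · have hnot : x.2 ∉ (xs.filter (fun pr => pr.1 == ok)).map Prod.snd := by
          intro hmem
          rcases List.mem_map.mp hmem with ⟨pr, hpr, he⟩
          have h1 : pr.1 = ok := by simpa using (List.mem_filter.mp hpr).2
          have hpx : pr = x := Prod.ext (h1.trans hq.symm) he
          exact hx ((PySem.Set.mem_ofList _ _).mpr (hpx ▸ (List.mem_filter.mp hpr).1))
        rw [show (([x].filter (fun pr => pr.1 == ok)) = [x]) from by simp [hq]]
        rw [List.map_append, List.map_singleton, List.map_append, List.map_singleton,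
            PySem.Set.ofList_append_singleton,
            PySem.Set.add_of_not_mem (fun h => hnot ((PySem.Set.mem_ofList _ _).mp h)), ih]
      · rw [show (([x].filter (fun pr => pr.1 == ok)) = []) from by simp [hq]]
        simpa using ih

-- the items of B's building loop, for a duplicate-free pair list
theorem pvBuild_items (ps : List (String × String)) (v : String × String → List String)
    (hnd : ps.Nodup) :
    (ps.foldl (fun res pr =>
        res.modify pr.1 PySem.Dict.empty (fun inner => inner.insert pr.2 (v pr)))
      PySem.Dict.empty).items.map (fun p => (p.1, p.2.items))
    = (PySem.Set.ofList (ps.map Prod.fst)).map (fun ok =>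
        (ok, (ps.filter (fun pr => pr.1 == ok)).map (fun pr => (pr.2, v pr)))) := by
  set step := fun (res : PySem.Dict String (PySem.Dict String (List String))) (pr : String × String) =>
    res.modify pr.1 PySem.Dict.empty (fun inner => inner.insert pr.2 (v pr)) with hstep
  have hknd : (ps.foldl step PySem.Dict.empty).keys.Nodup := by
    exact PySem.Dict.nodup_keys_foldl_modify_key ps Prod.fst PySem.Dict.empty
      (fun _ pr inner => inner.insert pr.2 (v pr)) PySem.Dict.empty PySem.Dict.nodup_keys_empty
  have hkeys : (ps.foldl step PySem.Dict.empty).keys = PySem.Set.ofList (ps.map Prod.fst) := by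
    rw [show step = (fun d x => d.modify (Prod.fst x) PySem.Dict.empty
      ((fun (_ : PySem.Dict String (PySem.Dict String (List String))) (pr : String × String) (inner : PySem.Dict String (List String)) => inner.insert pr.2 (v pr)) d x)) from rfl]
    rw [PySem.Dict.keys_foldl_modify_key]
    simp [PySem.Set.update_nil_left]
  have hitems : (ps.foldl step PySem.Dict.empty).items =
      (PySem.Set.ofList (ps.map Prod.fst)).map (fun k => (k, (ps.foldl step PySem.Dict.empty).getD k PySem.Dict.empty)) := by
    rw [← hkeys]
    exact PySem.Dict.items_eq_map_keys _ hknd _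
  rw [hitems, List.map_map]
  apply List.map_congr_left
  intro ok _
  have hgd : (ps.foldl step PySem.Dict.empty).getD ok PySem.Dict.empty =
      (ps.filter (fun pr => pr.1 == ok)).foldl
        (fun inner pr => inner.insert pr.2 (v pr)) PySem.Dict.empty := by
    have := pvGetD_foldl_modify ps Prod.fst
      (fun pr inner => inner.insert pr.2 (v pr)) PySem.Dict.empty PySem.Dict.empty ok
    simpa [PySem.Dict.getD_empty] using this
  set qs := ps.filter (fun pr => pr.1 == ok) with hqs
  have hqnd : (qs.map (fun pr => pr.2)).Nodup := by
    have hq : qs.Nodup := hnd.filter _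
    refine hq.map_on ?_
    intro x hx y hy he
    have hx1 : x.1 = ok := by simpa using (List.mem_filter.mp hx).2
    have hy1 : y.1 = ok := by simpa using (List.mem_filter.mp hy).2
    exact Prod.ext (hx1.trans hy1.symm) he
  have hfresh : ∀ pr ∈ qs, (PySem.Dict.empty : PySem.Dict String (List String)).contains pr.2 = false := by
    intro pr _
    rfl
  have := PySem.Dict.items_foldl_insert_fresh (l := qs) (k := fun pr => pr.2)
    (v := fun pr => v pr) (d := PySem.Dict.empty) hfresh hqnd
  simp only [Function.comp_def, hgd, this]
  simp [show (PySem.Dict.empty : PySem.Dict String (List String)).items = [] from rfl]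

-- canonical form of the B side, and its agreement with A's
theorem pvB_canon (d1 d2 : List (String × List (String × List String)))
    (h1 : (d1.map Prod.fst).Nodup) (h2 : (d2.map Prod.fst).Nodup)
    (hi1 : ∀ p ∈ d1, (p.2.map Prod.fst).Nodup) (hi2 : ∀ p ∈ d2, (p.2.map Prod.fst).Nodup) :
    (PySem.Set.ofList (((pvFlat d1 ++ pvFlat d2)).map Prod.fst)).map (fun ok =>
        let G := (pvFlat d1 ++ pvFlat d2).filter (fun r => r.1 == ok)
        let innerD := G.foldl (fun mi r => mi.modify r.2.1 [] (fun l => l ++ r.2.2)) PySem.Dict.empty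
        (ok, (PySem.Set.ofList (G.map (fun r => r.2.1))).map (fun ik =>
          (ik, PySem.List.dedup (innerD.getD ik []))))) = merge_dl_dicts_alt d1 d2 := by
  set L := pvFlat d1 ++ pvFlat d2 with hL
  -- the flattened pair stream of B is the projection of L
  have hP : (d1 ++ d2).flatMap (fun p => p.2.map (fun q => (p.1, q.1)))
      = L.map (fun r => (r.1, r.2.1)) := by
    simp [hL, pvFlat, List.map_flatMap, List.map_map, Function.comp_def]
  show _ = merge_dl_dicts_alt d1 d2
  unfold merge_dl_dicts_alt
  rw [hP]
  rw [pvBuild_items _ _ (PySem.Set.nodup_ofList _)]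
  -- outer key lists agree
  have houter : PySem.Set.ofList ((PySem.Set.ofList (L.map (fun r => (r.1, r.2.1)))).map Prod.fst)
      = PySem.Set.ofList (L.map Prod.fst) := by
    rw [pvOfList_map_ofList, List.map_map]
    rfl
  rw [houter]
  apply List.map_congr_left
  intro ok _
  refine congrArg (fun z => (ok, z)) ?_
  set G := L.filter (fun r => r.1 == ok) with hG
  -- per-key pair list of B
  have hqsnd : ((PySem.Set.ofList (L.map (fun r => (r.1, r.2.1)))).filter (fun pr => pr.1 == ok)).map Prod.snd
      = PySem.Set.ofList (G.map (fun r => r.2.1)) := by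
    rw [pvOfList_filter_snd, List.filter_map]
    simp only [Function.comp_def, hG, List.map_map]
  -- B's per-pair value depends only on the second component once the first is ok
  have hval : ((PySem.Set.ofList (L.map (fun r => (r.1, r.2.1)))).filter (fun pr => pr.1 == ok)).map
        (fun pr => (pr.2, PySem.List.dedup
          ((List.lookup pr.2 ((List.lookup pr.1 d1).getD [])).getD [] ++
           (List.lookup pr.2 ((List.lookup pr.1 d2).getD [])).getD [])))
      = (((PySem.Set.ofList (L.map (fun r => (r.1, r.2.1)))).filter (fun pr => pr.1 == ok)).map Prod.snd).map
        (fun ik => (ik, PySem.List.dedup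
          ((List.lookup ik ((List.lookup ok d1).getD [])).getD [] ++
           (List.lookup ik ((List.lookup ok d2).getD [])).getD []))) := by
    rw [List.map_map]
    apply List.map_congr_left
    intro pr hpr
    have h1 : pr.1 = ok := by simpa using (List.mem_filter.mp hpr).2
    simp [Function.comp_def, h1]
  rw [hval, hqsnd]
  apply List.map_congr_left
  intro ik _
  refine congrArg (fun z => (ik, PySem.List.dedup z)) ?_
  -- A's accumulated url list for (ok, ik) is the concatenation of the two lookups
  have hfG : G = ((List.lookup ok d1).getD []).map (fun q => (ok, q)) ++
      ((List.lookup ok d2).getD []).map (fun q => (ok, q)) := by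
    rw [hG, hL, List.filter_append, pvFilter_flat d1 ok h1, pvFilter_flat d2 ok h2]
  set i1 := (List.lookup ok d1).getD [] with hi1d
  set i2 := (List.lookup ok d2).getD [] with hi2d
  have hnd1 : (i1.map Prod.fst).Nodup := pvLookup_nodup d1 ok hi1
  have hnd2 : (i2.map Prod.fst).Nodup := pvLookup_nodup d2 ok hi2
  rw [hfG]
  have := pvGetD_foldl_modify (i1.map (fun q => (ok, q)) ++ i2.map (fun q => (ok, q)))
    (fun r => r.2.1) (fun r l => l ++ r.2.2) [] PySem.Dict.empty ik
  rw [show (fun (mi : PySem.Dict String (List String)) (r : String × (String × List String)) =>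
      mi.modify r.2.1 [] (fun l => l ++ r.2.2)) = (fun d a => d.modify ((fun (r : String × (String × List String)) => r.2.1) a) []
      ((fun (r : String × (String × List String)) (l : List String) => l ++ r.2.2) a)) from rfl]
  rw [this, pvFoldl_append_eq_flatten]
  rw [List.filter_append, List.filter_map, List.filter_map]
  have e2 : ((fun (r : String × (String × List String)) => r.2.1 == ik) ∘ (fun (q : String × List String) => (ok, q))) = (fun (q : String × List String) => q.1 == ik) := rfl
  rw [e2]
  simp only [List.map_append, List.map_map, PySem.Dict.getD_empty, List.nil_append,
    List.flatten_append]
  have e3 : (fun (r : String × (String × List String)) => r.2.2) ∘ (fun (q : String × List String) => (ok, q)) = (fun (q : String × List String) => q.2) := rfl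
  rw [e3, pvFlatten_filter_lookup i1 ik hnd1, pvFlatten_filter_lookup i2 ik hnd2]

-- ===== VERDICT (by name: the statement is the Claim_ definition above) =====
theorem merge_dl_dicts_spec : Claim_equal_merge_dl_dicts := by
  intro d1 d2 _ hpre
  obtain ⟨h1, h2, hia, hib⟩ := hpre
  unfold Spec_merge_dl_dicts
  exact (pvA_canon d1 d2 h1 h2).trans (pvB_canon d1 d2 h1 h2 hia hib)
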